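-- pv_equiv track=rewrite | github.com/SoyaOda/meal_analysis_api- | app_v2/api/v1/endpoints/nutrition_search.py | determine_match_type
-- ===== SOURCE A (Python) =====
-- def determine_match_type(query: str, explanation: str, original_name: str,
--                         search_name_list: list, description: str) -> str:
--     """
--     改善されたマッチタイプ判定ロジック
--
--     Args:
--         query: 検索クエリ
--         explanation: Elasticsearchの_explanationフィールド
--         original_name: オリジナル名
--         search_name_list: 検索名リスト
--         description: 説明文
--
--     Returns:
--         適切なマッチタイプフラグ
--     """
--     q_lower = query.lower()
--
--     # 1. Exact Match（original_nameで完全一致）の判定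
--     if explanation == "exact_match_original_name_keyword":
--         return "exact_match"
--     elif explanation == "exact_match_original_name_case_insensitive":
--         return "exact_match"
--
--     # 2. original_nameでの直接比較（フォールバック）
--     if original_name and original_name.lower() == q_lower:
--         return "exact_match"
--
--     # 3. Tier 1: search_nameでの完全一致
--     for name in search_name_list:
--         if name.lower() == q_lower:
--             return "tier_1_exact"
--
--     # 4. Tier 2: descriptionでの完全一致
--     if description and description.lower() == q_lower:
--         return "tier_2_description"
--
--     # 5. Tier 3: search_nameでのプレフィックスマッチ
--     for name in search_name_list:
--         if name.lower().startswith(q_lower):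
--             return "tier_3_phrase"
--
--     # 6. Tier 4: descriptionでのプレフィックスマッチ
--     if description and description.lower().startswith(q_lower):
--         return "tier_4_phrase_desc"
--
--     # 7. Tier 5: search_nameでの部分マッチ
--     for name in search_name_list:
--         if q_lower in name.lower():
--             return "tier_5_term"
--
--     # 8. Tier 6: descriptionでの部分マッチ
--     if description and q_lower in description.lower():
--         return "tier_6_multi"
--
--     # 9. Tier 7: その他（ファジーマッチ）
--     return "tier_7_fuzzy"
-- ===== SOURCE B (Python) =====
-- def determine_match_type(query: str, explanation: str, original_name: str,
--                         search_name_list: list, description: str) -> str: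
--     """One-pass tier classifier: compute the minimal match level, then map it."""
--     if explanation in ("exact_match_original_name_keyword",
--                        "exact_match_original_name_case_insensitive"):
--         return "exact_match"
--     q = query.lower()
--     if original_name and original_name.lower() == q:
--         return "exact_match"
--     # single scan over the names: best (lowest) name level seen
--     level = 7
--     for name in search_name_list:
--         n = name.lower()
--         lvl = 1 if n == q else 3 if n.startswith(q) else 5 if q in n else 7
--         level = min(level, lvl)
--     if description:
--         d = description.lower()
--         dlvl = 2 if d == q else 4 if d.startswith(q) else 6 if q in d else 7
--         level = min(level, dlvl)
--     if level == 1: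
--         return "tier_1_exact"
--     if level == 2:
--         return "tier_2_description"
--     if level == 3:
--         return "tier_3_phrase"
--     if level == 4:
--         return "tier_4_phrase_desc"
--     if level == 5:
--         return "tier_5_term"
--     if level == 6:
--         return "tier_6_multi"
--     return "tier_7_fuzzy"
-- ===== Notes on version B (the rewrite author's own statement) =====
-- stated objective: simpler
-- what changed: Replaces A's three separate early-return scans over search_name_list (exact, prefix, substring) interleaved with description checks by ONE pass computing the minimal match level per name, a separate description level, and a final level-to-string map.
import Mathlib
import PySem

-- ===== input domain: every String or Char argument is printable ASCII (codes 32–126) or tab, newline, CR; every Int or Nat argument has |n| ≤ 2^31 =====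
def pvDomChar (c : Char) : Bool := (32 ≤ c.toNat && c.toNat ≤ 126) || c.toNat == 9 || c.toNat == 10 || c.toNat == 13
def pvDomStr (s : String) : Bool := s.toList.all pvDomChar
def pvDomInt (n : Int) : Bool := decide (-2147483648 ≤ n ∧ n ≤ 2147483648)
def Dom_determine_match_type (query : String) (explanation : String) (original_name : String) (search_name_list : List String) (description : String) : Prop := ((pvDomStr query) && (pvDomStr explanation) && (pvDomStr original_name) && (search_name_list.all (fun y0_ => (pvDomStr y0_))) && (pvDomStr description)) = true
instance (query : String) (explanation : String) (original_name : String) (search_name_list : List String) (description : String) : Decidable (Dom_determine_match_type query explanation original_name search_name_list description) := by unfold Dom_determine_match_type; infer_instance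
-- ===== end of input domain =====

-- B replaces three early-return scans by one minimal-level pass plus a level map (simpler decomposition; same results).
-- ===== PORT A =====
def aLoopEq : List String → String → Bool
  | [], _ => false
  | n :: t, q => if PySem.Str.lower n = q then true else aLoopEq t q

def aLoopPref : List String → String → Bool
  | [], _ => false
  | n :: t, q => if PySem.Str.startswith (PySem.Str.lower n) q then true else aLoopPref t q

def aLoopSub : List String → String → Bool
  | [], _ => false
  | n :: t, q => if PySem.Str.isIn q (PySem.Str.lower n) then true else aLoopSub t q

def determine_match_type (query : String) (explanation : String) (original_name : String) (search_name_list : List String) (description : String) : String :=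
  -- q_lower = query.lower(), written out at each use
  if explanation = "exact_match_original_name_keyword" then "exact_match"
  else if explanation = "exact_match_original_name_case_insensitive" then "exact_match"
  else if original_name ≠ "" ∧ PySem.Str.lower original_name = PySem.Str.lower query then "exact_match"
  else if aLoopEq search_name_list (PySem.Str.lower query) then "tier_1_exact"
  else if description ≠ "" ∧ PySem.Str.lower description = PySem.Str.lower query then "tier_2_description"
  else if aLoopPref search_name_list (PySem.Str.lower query) then "tier_3_phrase"
  else if description ≠ "" ∧ PySem.Str.startswith (PySem.Str.lower description) (PySem.Str.lower query) then "tier_4_phrase_desc"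
  else if aLoopSub search_name_list (PySem.Str.lower query) then "tier_5_term"
  else if description ≠ "" ∧ PySem.Str.isIn (PySem.Str.lower query) (PySem.Str.lower description) then "tier_6_multi"
  else "tier_7_fuzzy"

-- ===== PORT B =====
-- B: one pass computing the minimal match level, then a level-to-string map (simpler decomposition).
def bNameLvl (q : String) (name : String) : Nat :=
  if PySem.Str.lower name = q then 1
  else if PySem.Str.startswith (PySem.Str.lower name) q then 3
  else if PySem.Str.isIn q (PySem.Str.lower name) then 5 else 7

def bDescLvl (q : String) (description : String) : Nat :=
  if PySem.Str.lower description = q then 2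
  else if PySem.Str.startswith (PySem.Str.lower description) q then 4
  else if PySem.Str.isIn q (PySem.Str.lower description) then 6 else 7

def bLvlStr (level : Nat) : String :=
  if level = 1 then "tier_1_exact"
  else if level = 2 then "tier_2_description"
  else if level = 3 then "tier_3_phrase"
  else if level = 4 then "tier_4_phrase_desc"
  else if level = 5 then "tier_5_term"
  else if level = 6 then "tier_6_multi"
  else "tier_7_fuzzy"

def determine_match_type_alt (query : String) (explanation : String) (original_name : String) (search_name_list : List String) (description : String) : String :=
  if explanation = "exact_match_original_name_keyword" ∨ explanation = "exact_match_original_name_case_insensitive" then "exact_match"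
  else if original_name ≠ "" ∧ PySem.Str.lower original_name = PySem.Str.lower query then "exact_match"
  else
    bLvlStr
      (if description ≠ "" then
        min (search_name_list.foldl (fun m name => min m (bNameLvl (PySem.Str.lower query) name)) 7)
          (bDescLvl (PySem.Str.lower query) description)
      else search_name_list.foldl (fun m name => min m (bNameLvl (PySem.Str.lower query) name)) 7)

-- ===== PRECONDITION & SPEC =====
def Spec_determine_match_type (query : String) (explanation : String) (original_name : String) (search_name_list : List String) (description : String) (out : String) : Prop := out = determine_match_type_alt query explanation original_name search_name_list description
instance (query : String) (explanation : String) (original_name : String) (search_name_list : List String) (description : String) (out : String) : Decidable (Spec_determine_match_type query explanation original_name search_name_list description out) := by unfold Spec_determine_match_type; infer_instance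

-- ===== CLAIM (what is proved, stated in full; the proofs are below) =====
def Claim_equal_determine_match_type : Prop := ∀ (query : String) (explanation : String) (original_name : String) (search_name_list : List String) (description : String), Dom_determine_match_type query explanation original_name search_name_list description → Spec_determine_match_type query explanation original_name search_name_list description (determine_match_type query explanation original_name search_name_list description)

-- ===== LEMMAS AND PROOFS =====

-- characterisation of B's single-pass minimum via A's three scans
lemma aLoopEq_cons (n : String) (t : List String) (q : String) :
    aLoopEq (n :: t) q = (decide (PySem.Str.lower n = q) || aLoopEq t q) := by
  by_cases h : PySem.Str.lower n = q <;> simp [aLoopEq, h]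

lemma aLoopPref_cons (n : String) (t : List String) (q : String) :
    aLoopPref (n :: t) q = (PySem.Chars.startswith (PySem.Chars.lower n.toList) q.toList || aLoopPref t q) := by
  by_cases h : PySem.Str.startswith (PySem.Str.lower n) q = true <;>
    · have h' := h; simp at h'; simp [aLoopPref, h']

lemma aLoopSub_cons (n : String) (t : List String) (q : String) :
    aLoopSub (n :: t) q = (PySem.Chars.isIn q.toList (PySem.Chars.lower n.toList) || aLoopSub t q) := by
  by_cases h : PySem.Str.isIn q (PySem.Str.lower n) = true <;>
    · have h' := h; simp at h'; simp [aLoopSub, h']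

lemma fold_lvl_char (q : String) (L : List String) (acc : Nat) (hacc : acc ≤ 7) :
    L.foldl (fun m name => min m (bNameLvl q name)) acc =
      min acc (if aLoopEq L q then 1 else if aLoopPref L q then 3 else if aLoopSub L q then 5 else 7) := by
  induction L generalizing acc with
  | nil => simp [aLoopEq, aLoopPref, aLoopSub]; omega
  | cons n t ih =>
    rw [List.foldl_cons, ih (min acc (bNameLvl q n)) (by omega)]
    simp only [aLoopEq_cons, aLoopPref_cons, aLoopSub_cons]
    by_cases h1 : PySem.Str.lower n = q
    · have hb : bNameLvl q n = 1 := by simp [bNameLvl, h1]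
      have c1 : (decide (PySem.Str.lower n = q) || aLoopEq t q) = true := by simp [h1]
      simp only [hb, c1]
      split_ifs <;> omega
    · have c1 : (decide (PySem.Str.lower n = q) || aLoopEq t q) = aLoopEq t q := by simp [h1]
      by_cases h3 : PySem.Chars.startswith (PySem.Chars.lower n.toList) q.toList = true
      · have hb : bNameLvl q n = 3 := by simp [bNameLvl, h1, h3]
        have c2 : (PySem.Chars.startswith (PySem.Chars.lower n.toList) q.toList || aLoopPref t q) = true := by
          simp [h3]
        simp only [hb, c1, c2]
        split_ifs <;> omega
      · have c2 : (PySem.Chars.startswith (PySem.Chars.lower n.toList) q.toList || aLoopPref t q) = aLoopPref t q := by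
          simp [h3]
        by_cases h5 : PySem.Chars.isIn q.toList (PySem.Chars.lower n.toList) = true
        · have hb : bNameLvl q n = 5 := by simp [bNameLvl, h1, h3, h5]
          have c3 : (PySem.Chars.isIn q.toList (PySem.Chars.lower n.toList) || aLoopSub t q) = true := by simp [h5]
          simp only [hb, c1, c2, c3]
          split_ifs <;> omega
        · have hb : bNameLvl q n = 7 := by simp [bNameLvl, h1, h3, h5]
          have c3 : (PySem.Chars.isIn q.toList (PySem.Chars.lower n.toList) || aLoopSub t q) = aLoopSub t q := by
            simp [h5]
          simp only [hb, c1, c2, c3]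
          split_ifs <;> omega

-- ===== VERDICT (by name: the statement is the Claim_ definition above) =====
theorem determine_match_type_spec : Claim_equal_determine_match_type := by
  intro query explanation original_name search_name_list description _
  unfold Spec_determine_match_type determine_match_type determine_match_type_alt
  by_cases hk : explanation = "exact_match_original_name_keyword"
  · simp [hk]
  by_cases hc : explanation = "exact_match_original_name_case_insensitive"
  · simp [hc]
  rw [if_neg hk, if_neg hc, if_neg (by tauto :
    ¬(explanation = "exact_match_original_name_keyword" ∨
      explanation = "exact_match_original_name_case_insensitive"))]
  by_cases ho : original_name ≠ "" ∧ PySem.Str.lower original_name = PySem.Str.lower query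
  · rw [if_pos ho, if_pos ho]
  rw [if_neg ho, if_neg ho, fold_lvl_char (PySem.Str.lower query) search_name_list 7 (by norm_num)]
  by_cases hd : description = ""
  · rw [if_neg (fun h : description ≠ "" ∧ PySem.Str.lower description = PySem.Str.lower query => h.1 hd),
      if_neg (fun h : description ≠ "" ∧ PySem.Str.startswith (PySem.Str.lower description) (PySem.Str.lower query) = true => h.1 hd),
      if_neg (fun h : description ≠ "" ∧ PySem.Str.isIn (PySem.Str.lower query) (PySem.Str.lower description) = true => h.1 hd),
      if_neg (fun h : description ≠ "" => h hd)]
    by_cases e1 : aLoopEq search_name_list (PySem.Str.lower query) = true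
    · rw [if_pos e1, if_pos e1]; rfl
    · rw [if_neg e1, if_neg e1]
      by_cases e3 : aLoopPref search_name_list (PySem.Str.lower query) = true
      · rw [if_pos e3, if_pos e3]; rfl
      · rw [if_neg e3, if_neg e3]
        by_cases e5 : aLoopSub search_name_list (PySem.Str.lower query) = true
        · rw [if_pos e5, if_pos e5]; rfl
        · rw [if_neg e5, if_neg e5]; rfl
  · have hd' : description ≠ "" := hd
    rw [if_pos hd']
    have hDlo : 1 ≤ bDescLvl (PySem.Str.lower query) description := by
      unfold bDescLvl; split_ifs <;> norm_num
    by_cases e1 : aLoopEq search_name_list (PySem.Str.lower query) = true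
    · rw [if_pos e1, if_pos e1]
      have hm : min (min 7 1) (bDescLvl (PySem.Str.lower query) description) = 1 := by omega
      rw [hm]; rfl
    · rw [if_neg e1, if_neg e1]
      by_cases d1 : PySem.Str.lower description = PySem.Str.lower query
      · rw [if_pos ⟨hd', d1⟩]
        have hD : bDescLvl (PySem.Str.lower query) description = 2 := by
          unfold bDescLvl; rw [if_pos d1]
        have hX : 3 ≤ (if aLoopPref search_name_list (PySem.Str.lower query) = true then 3
            else if aLoopSub search_name_list (PySem.Str.lower query) = true then 5 else 7) := by
          split_ifs <;> norm_num
        rw [hD]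
        have hm : min (min 7 (if aLoopPref search_name_list (PySem.Str.lower query) = true then 3
            else if aLoopSub search_name_list (PySem.Str.lower query) = true then 5 else 7)) 2 = 2 := by
          omega
        rw [hm]; rfl
      · rw [if_neg (fun h => d1 h.2)]
        have hD4 : 4 ≤ bDescLvl (PySem.Str.lower query) description := by
          unfold bDescLvl; rw [if_neg d1]; split_ifs <;> norm_num
        by_cases e3 : aLoopPref search_name_list (PySem.Str.lower query) = true
        · rw [if_pos e3, if_pos e3]
          have hm : min (min 7 3) (bDescLvl (PySem.Str.lower query) description) = 3 := by omega
          rw [hm]; rfl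
        · rw [if_neg e3, if_neg e3]
          by_cases d2 : PySem.Str.startswith (PySem.Str.lower description) (PySem.Str.lower query) = true
          · rw [if_pos ⟨hd', d2⟩]
            have d2' := d2
            simp at d2'
            have hD : bDescLvl (PySem.Str.lower query) description = 4 := by
              simp [bDescLvl, d1, d2']
            have hX : 5 ≤ (if aLoopSub search_name_list (PySem.Str.lower query) = true then 5
                else 7) := by split_ifs <;> norm_num
            rw [hD]
            have hm : min (min 7 (if aLoopSub search_name_list (PySem.Str.lower query) = true then 5
                else 7)) 4 = 4 := by omega
            rw [hm]; rfl
          · rw [if_neg (fun h => d2 h.2)]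
            have hD6 : 6 ≤ bDescLvl (PySem.Str.lower query) description := by
              have d2' := d2
              simp at d2'
              simp only [bDescLvl, if_neg d1]
              rw [if_neg (by simpa using d2')]
              split_ifs <;> norm_num
            by_cases e5 : aLoopSub search_name_list (PySem.Str.lower query) = true
            · rw [if_pos e5, if_pos e5]
              have hm : min (min 7 5) (bDescLvl (PySem.Str.lower query) description) = 5 := by omega
              rw [hm]; rfl
            · rw [if_neg e5, if_neg e5]
              by_cases d3 : PySem.Str.isIn (PySem.Str.lower query) (PySem.Str.lower description) = true
              · rw [if_pos ⟨hd', d3⟩]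
                have d2' := d2
                simp at d2'
                have hD : bDescLvl (PySem.Str.lower query) description = 6 := by
                  have d3' := d3
                  simp at d3'
                  simp [bDescLvl, d1, d2', d3']
                rw [hD]; rfl
              · rw [if_neg (fun h => d3 h.2)]
                have hD : bDescLvl (PySem.Str.lower query) description = 7 := by
                  have d2' := d2
                  simp at d2'
                  have d3' := d3
                  simp at d3'
                  simp [bDescLvl, d1, d2', d3']
                rw [hD]; rfl
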